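-- pv_equiv track=rewrite | github.com/botanicalpilot/bootcamp | practice3_3.py | evenNN
-- ===== SOURCE A (Python) =====
-- def evenNN(numberList):
--     evenList = []
--     for number in numberList:
--         if number % 2 == 0:
--             evenList.append(numberList)
--     if len(evenList) % 2 == 0:
--         return True
--     else:
--         return False
-- ===== SOURCE B (Python) =====
-- def evenNN(numberList):
--     # The count of even elements has the same parity as len - sum
--     # (sum mod 2 equals the number of odd elements mod 2), so no
--     # per-element test or loop is needed.
--     return (len(numberList) - sum(numberList)) % 2 == 0
-- ===== Notes on version B (the rewrite author's own statement) =====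
-- stated objective: faster
-- what changed: Replaces the build-a-list-of-evens-and-test-len%2 loop by the arithmetic identity count_of_evens ≡ len - sum (mod 2): B returns (len(numberList) - sum(numberList)) % 2 == 0 with no per-element evenness test, branch or list growth (C-level builtin sum).
import Mathlib
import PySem

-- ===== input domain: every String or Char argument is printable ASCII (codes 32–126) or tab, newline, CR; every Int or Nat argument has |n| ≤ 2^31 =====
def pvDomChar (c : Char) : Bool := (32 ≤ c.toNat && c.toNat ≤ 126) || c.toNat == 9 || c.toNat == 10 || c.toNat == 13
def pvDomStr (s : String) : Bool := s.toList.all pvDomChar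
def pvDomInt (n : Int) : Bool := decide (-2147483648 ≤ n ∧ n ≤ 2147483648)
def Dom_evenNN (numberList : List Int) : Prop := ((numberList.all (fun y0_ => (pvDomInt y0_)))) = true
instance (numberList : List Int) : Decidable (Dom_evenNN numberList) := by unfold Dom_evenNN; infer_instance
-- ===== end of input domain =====

-- B replaces A's accumulate-evens-then-len%2 loop by the arithmetic identity
-- #evens ≡ len - sum (mod 2); no per-element evenness test remains.

-- ===== PORT A =====
-- literal port of A: accumulate a list (appending numberList at each even element), then test len % 2 == 0
def evenNN (numberList : List Int) : Bool :=
  let evenList := numberList.foldl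
    (fun acc number => if PySem.Int.mod number 2 = 0 then acc ++ [numberList] else acc) []
  decide (PySem.Int.mod (Int.ofNat evenList.length) 2 = 0)

-- ===== PORT B =====
-- B: (len(numberList) - sum(numberList)) % 2 == 0  (sum as List.sum)
def evenNN_alt (numberList : List Int) : Bool :=
  decide (PySem.Int.mod (Int.ofNat numberList.length - numberList.sum) 2 = 0)

-- ===== PRECONDITION & SPEC =====
def Spec_evenNN (numberList : List Int) (out : Bool) : Prop := out = evenNN_alt numberList
instance (numberList : List Int) (out : Bool) : Decidable (Spec_evenNN numberList out) := by unfold Spec_evenNN; infer_instance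

-- ===== CLAIM (what is proved, stated in full; the proofs are below) =====
def Claim_equal_evenNN : Prop := ∀ (numberList : List Int), Dom_evenNN numberList → Spec_evenNN numberList (evenNN numberList)

-- ===== LEMMAS AND PROOFS =====
-- loop invariant for A's fold: the accumulated length tracks (len - sum) mod 2
theorem evenNN_aux (z : List Int) (xs : List Int) : ∀ (acc : List (List Int)),
    ((xs.foldl (fun acc number => if PySem.Int.mod number 2 = 0 then acc ++ [z] else acc) acc).length : Int) % 2
      = ((acc.length : Int) + (xs.length : Int) - xs.sum) % 2 := by
  induction xs with
  | nil => intro acc; simp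
  | cons x xs ih =>
    intro acc
    simp only [List.foldl_cons, List.sum_cons, List.length_cons,
      PySem.Int.mod_eq_emod_of_pos (show (0:Int) < 2 by omega)]
    simp only [PySem.Int.mod_eq_emod_of_pos (show (0:Int) < 2 by omega)] at ih
    by_cases hx : x % 2 = 0
    · rw [if_pos hx, ih]
      simp only [List.length_append, List.length_cons, List.length_nil]
      push_cast
      omega
    · rw [if_neg hx, ih]
      have := Int.emod_two_eq x
      push_cast
      omega

-- ===== VERDICT (by name: the statement is the Claim_ definition above) =====
theorem evenNN_spec : Claim_equal_evenNN := by
  intro numberList _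
  unfold Spec_evenNN evenNN evenNN_alt
  have h := evenNN_aux numberList numberList []
  simp only [List.length_nil, Int.natCast_zero, zero_add] at h
  simp only [PySem.Int.mod_eq_emod_of_pos (show (0:Int) < 2 by omega), Int.ofNat_eq_natCast] at h ⊢
  rw [h]
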